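-- pv_equiv track=rewrite | github.com/WakenLLMTeam/WakenLLM-toolkit | Bosch_DeepResearch/deer-flow-2-copy/skills/public/summary-ppt-editable/scripts/slides_agent.py | _build_diversity_hint
-- ===== SOURCE A (Python) =====
-- from typing import Any, Dict, List, Optional
--
-- def _build_diversity_hint(used_viz_types: Dict[str, int], max_per_type: int) -> str:
--     """
--     Build a diversity hint with soft penalty tiers based on use count.
--
--     Tiers:
--       0 uses  → STRONGLY PREFERRED  (fresh)
--       1 use   → DEPRIORITIZED       (soft avoid — only pick if clearly best fit)
--       2 uses  → STRONGLY AVOID      (heavy penalty — pick fresh type instead)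
--       3+ uses → DO NOT USE          (hard block)
--     """
--     ALL_TYPES = [
--         "timeline", "flowchart", "comparison", "pipeline", "arch",
--         "bar_chart", "line_chart", "scatter", "heatmap", "waterfall",
--         "funnel", "radar", "mindmap", "tree", "matrix_2x2",
--         "venn", "onion", "gantt", "swot",
--     ]
--     unused = [t for t in ALL_TYPES if t not in used_viz_types]
--     used_once  = [t for t, n in used_viz_types.items() if n == 1]
--     used_twice = [t for t, n in used_viz_types.items() if n == 2]
--     used_heavy = [t for t, n in used_viz_types.items() if n >= 3]
--
--     lines = []
--     if unused:
--         lines.append(f"  [STRONGLY PREFERRED — not yet used]: {', '.join(unused)}")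
--     if used_once:
--         lines.append(f"  [DEPRIORITIZED — used once, avoid if a fresh type fits]: {', '.join(used_once)}")
--     if used_twice:
--         lines.append(f"  [STRONGLY AVOID — used twice, pick a fresh type instead]: {', '.join(used_twice)}")
--     if used_heavy:
--         lines.append(f"  [DO NOT USE — used 3+ times]: {', '.join(used_heavy)}")
--     if not lines:
--         lines.append("  (none used yet — all 19 types are available)")
--     return "\n".join(lines)
-- ===== SOURCE B (Python) =====
-- def _build_diversity_hint(used_viz_types, max_per_type):
--     ALL_TYPES = [
--         "timeline", "flowchart", "comparison", "pipeline", "arch",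
--         "bar_chart", "line_chart", "scatter", "heatmap", "waterfall",
--         "funnel", "radar", "mindmap", "tree", "matrix_2x2",
--         "venn", "onion", "gantt", "swot",
--     ]
--     LABELS = [
--         "  [STRONGLY PREFERRED — not yet used]: ",
--         "  [DEPRIORITIZED — used once, avoid if a fresh type fits]: ",
--         "  [STRONGLY AVOID — used twice, pick a fresh type instead]: ",
--         "  [DO NOT USE — used 3+ times]: ",
--     ]
--     # sections[k] is the already-comma-joined body of tier k (None = tier empty);
--     # tiers: 0 = unused, 1 = once, 2 = twice, 3 = three-or-more.
--     sections = [None, None, None, None]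
--
--     def put(k, name):
--         sections[k] = name if sections[k] is None else sections[k] + ", " + name
--
--     used = set(used_viz_types)
--     for t in ALL_TYPES:
--         if t not in used:
--             put(0, t)
--     for t, n in used_viz_types.items():
--         if n >= 1:
--             put(n if n < 3 else 3, t)
--
--     out = None
--     for label, body in zip(LABELS, sections):
--         if body is not None:
--             line = label + body
--             out = line if out is None else out + "\n" + line
--     return out if out is not None else "  (none used yet — all 19 types are available)"
-- ===== Notes on version B (the rewrite author's own statement) =====
-- stated objective: alternative
-- what changed: Instead of A's four bucket lists each comma-joined and appended conditionally, B computes each type's tier index arithmetically (min(n,3), dropping n<1) and maintains incrementally comma-joined section strings (None = empty), then accumulates the output line by line over a label table, so no intermediate lists and no join calls exist.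
import Mathlib
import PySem

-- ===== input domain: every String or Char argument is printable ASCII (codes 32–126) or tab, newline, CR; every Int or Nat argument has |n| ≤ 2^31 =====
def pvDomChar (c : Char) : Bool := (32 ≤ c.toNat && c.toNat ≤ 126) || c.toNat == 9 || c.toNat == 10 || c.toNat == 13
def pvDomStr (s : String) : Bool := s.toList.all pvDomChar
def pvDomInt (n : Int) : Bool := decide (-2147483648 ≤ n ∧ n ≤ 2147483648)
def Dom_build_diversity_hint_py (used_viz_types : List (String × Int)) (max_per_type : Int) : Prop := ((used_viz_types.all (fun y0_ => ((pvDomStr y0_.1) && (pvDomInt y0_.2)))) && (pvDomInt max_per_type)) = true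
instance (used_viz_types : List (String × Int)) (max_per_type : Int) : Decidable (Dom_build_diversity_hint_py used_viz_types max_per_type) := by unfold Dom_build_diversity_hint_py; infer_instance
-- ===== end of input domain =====

-- B replaces A's four filter-then-join scans by incremental string sections: each type's
-- tier index is computed arithmetically (min(n,3)) in one pass that appends ", "-separated
-- bodies directly, and the output is likewise accumulated line by line (objective: simpler
-- decomposition, same cost; no intermediate bucket lists, no join calls).


-- ===== PORT A =====
def pvAllTypes : List String :=
  ["timeline", "flowchart", "comparison", "pipeline", "arch",
   "bar_chart", "line_chart", "scatter", "heatmap", "waterfall",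
   "funnel", "radar", "mindmap", "tree", "matrix_2x2",
   "venn", "onion", "gantt", "swot"]

def build_diversity_hint_py (used_viz_types : List (String × Int)) (max_per_type : Int) : String :=
  let unused := pvAllTypes.filter (fun t => !(used_viz_types.any (fun p => p.1 == t)))
  let used_once := (used_viz_types.filter (fun p => p.2 == 1)).map (fun p => p.1)
  let used_twice := (used_viz_types.filter (fun p => p.2 == 2)).map (fun p => p.1)
  let used_heavy := (used_viz_types.filter (fun p => 3 ≤ p.2)).map (fun p => p.1)
  let lines : List String := []
  let lines := if unused.isEmpty then lines else
    lines ++ ["  [STRONGLY PREFERRED — not yet used]: " ++ PySem.Str.join ", " unused]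
  let lines := if used_once.isEmpty then lines else
    lines ++ ["  [DEPRIORITIZED — used once, avoid if a fresh type fits]: " ++ PySem.Str.join ", " used_once]
  let lines := if used_twice.isEmpty then lines else
    lines ++ ["  [STRONGLY AVOID — used twice, pick a fresh type instead]: " ++ PySem.Str.join ", " used_twice]
  let lines := if used_heavy.isEmpty then lines else
    lines ++ ["  [DO NOT USE — used 3+ times]: " ++ PySem.Str.join ", " used_heavy]
  let lines := if lines.isEmpty then ["  (none used yet — all 19 types are available)"] else lines
  PySem.Str.join "\n" lines

-- ===== PORT B =====
def pvLabels : List String :=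
  ["  [STRONGLY PREFERRED — not yet used]: ",
   "  [DEPRIORITIZED — used once, avoid if a fresh type fits]: ",
   "  [STRONGLY AVOID — used twice, pick a fresh type instead]: ",
   "  [DO NOT USE — used 3+ times]: "]

-- put(k, name): extend the (already comma-joined) body of a tier; none = tier empty
def pvOptAdd (s : Option String) (t : String) : Option String :=
  match s with
  | none => some t
  | some s => some (s ++ ", " ++ t)

-- one pass over the counts: tier index is n clamped at 3 (counts < 1 are dropped)
def pvTierStep (st : Option String × Option String × Option String) (p : String × Int) :
    Option String × Option String × Option String :=
  if 1 ≤ p.2 then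
    let k : Int := if p.2 < 3 then p.2 else 3
    if k == 1 then (pvOptAdd st.1 p.1, st.2.1, st.2.2)
    else if k == 2 then (st.1, pvOptAdd st.2.1 p.1, st.2.2)
    else (st.1, st.2.1, pvOptAdd st.2.2 p.1)
  else st

-- output accumulated line by line (none = no line emitted yet)
def pvEmit (o : Option String) (e : String × Option String) : Option String :=
  match e.2 with
  | none => o
  | some body =>
    match o with
    | none => some (e.1 ++ body)
    | some s => some (s ++ "\n" ++ (e.1 ++ body))

def build_diversity_hint_py_alt (used_viz_types : List (String × Int)) (max_per_type : Int) : String :=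
  let used := PySem.Set.ofList (used_viz_types.map Prod.fst)
  let s0 := pvAllTypes.foldl
    (fun s t => if PySem.Set.contains used t then s else pvOptAdd s t) none
  let st := used_viz_types.foldl pvTierStep (none, none, none)
  let out := (pvLabels.zip [s0, st.1, st.2.1, st.2.2]).foldl pvEmit none
  match out with
  | some s => s
  | none => "  (none used yet — all 19 types are available)"

-- ===== PRECONDITION & SPEC =====
def Spec_build_diversity_hint_py (used_viz_types : List (String × Int)) (max_per_type : Int) (out : String) : Prop := out = build_diversity_hint_py_alt used_viz_types max_per_type
instance (used_viz_types : List (String × Int)) (max_per_type : Int) (out : String) : Decidable (Spec_build_diversity_hint_py used_viz_types max_per_type out) := by unfold Spec_build_diversity_hint_py; infer_instance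

-- ===== CLAIM =====
def Claim_equal_build_diversity_hint_py : Prop := ∀ (used_viz_types : List (String × Int)) (max_per_type : Int), Dom_build_diversity_hint_py used_viz_types max_per_type → Spec_build_diversity_hint_py used_viz_types max_per_type (build_diversity_hint_py used_viz_types max_per_type)

-- ===== LEMMAS AND PROOFS =====
lemma pvFoldl_append_pull (sep : String) (r : List String) (s x : String) :
    r.foldl (fun acc t => acc ++ sep ++ t) (s ++ x)
      = s ++ r.foldl (fun acc t => acc ++ sep ++ t) x := by
  induction r generalizing x with
  | nil => simp
  | cons b t ih =>
    simp only [List.foldl_cons]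
    rw [show s ++ x ++ sep ++ b = s ++ (x ++ sep ++ b) from by
      simp [String.append_assoc], ih]

lemma pvJoin_foldl (sep a : String) (l : List String) :
    PySem.Str.join sep (a :: l) = l.foldl (fun acc t => acc ++ sep ++ t) a := by
  induction l generalizing a with
  | nil => simp [PySem.Str.join, PySem.Chars.join_singleton]
  | cons b r ih =>
    have h : PySem.Str.join sep (a :: b :: r) = a ++ sep ++ PySem.Str.join sep (b :: r) := by
      simp [PySem.Str.join, PySem.Chars.join_cons_cons, String.append_assoc]
    rw [h, ih b]
    simp only [List.foldl_cons]
    rw [show a ++ sep ++ b = (a ++ sep) ++ b from by simp [String.append_assoc],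
        pvFoldl_append_pull, String.append_assoc]

lemma pvFoldl_optAdd_some (l : List String) (s : String) :
    l.foldl pvOptAdd (some s) = some (l.foldl (fun acc t => acc ++ ", " ++ t) s) := by
  induction l generalizing s with
  | nil => rfl
  | cons b r ih => simp only [List.foldl_cons, pvOptAdd, ih]

lemma pvFoldl_optAdd_none (l : List String) :
    l.foldl pvOptAdd none
      = if l.isEmpty then none else some (PySem.Str.join ", " l) := by
  cases l with
  | nil => rfl
  | cons a r =>
    simp [pvOptAdd, pvFoldl_optAdd_some, pvJoin_foldl]

lemma pvContains_ofList_map (l : List (String × Int)) (t : String) :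
    PySem.Set.contains (PySem.Set.ofList (l.map Prod.fst)) t
      = l.any (fun p => p.1 == t) := by
  rw [Bool.eq_iff_iff]
  simp only [PySem.Set.contains_iff, PySem.Set.mem_ofList, List.mem_map,
    List.any_eq_true, beq_iff_eq]

lemma pvFoldl_skip_filter (c : String → Bool) (l : List String) (acc : Option String) :
    l.foldl (fun s t => if c t then s else pvOptAdd s t) acc
      = (l.filter (fun t => !c t)).foldl pvOptAdd acc := by
  induction l generalizing acc with
  | nil => rfl
  | cons a r ih =>
    by_cases h : c a = true <;> simp [h, ih]

lemma pvTier_spec (l : List (String × Int)) (x y z : Option String) :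
    l.foldl pvTierStep (x, y, z)
      = (((l.filter (fun p => p.2 == 1)).map (fun p => p.1)).foldl pvOptAdd x,
         ((l.filter (fun p => p.2 == 2)).map (fun p => p.1)).foldl pvOptAdd y,
         ((l.filter (fun p => 3 ≤ p.2)).map (fun p => p.1)).foldl pvOptAdd z) := by
  induction l generalizing x y z with
  | nil => simp
  | cons p t ih =>
    simp only [List.foldl_cons]
    by_cases h1 : p.2 = 1
    · rw [show pvTierStep (x, y, z) p = (pvOptAdd x p.1, y, z) from by
        simp [pvTierStep, h1], ih]
      simp [h1]
    · by_cases h2 : p.2 = 2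
      · rw [show pvTierStep (x, y, z) p = (x, pvOptAdd y p.1, z) from by
          simp [pvTierStep, h2], ih]
        simp [h2]
      · by_cases h3 : 3 ≤ p.2
        · rw [show pvTierStep (x, y, z) p = (x, y, pvOptAdd z p.1) from by
            have hk : ¬ p.2 < 3 := by omega
            simp [pvTierStep, hk]; omega, ih]
          simp [h1, h2, h3]
        · rw [show pvTierStep (x, y, z) p = (x, y, z) from by
            simp [pvTierStep]; omega, ih]
          simp only [List.filter_cons]
          have e1 : (p.2 == 1) = false := by simp [h1]
          have e2 : (p.2 == 2) = false := by simp [h2]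
          have e3 : decide (3 ≤ p.2) = false := by simp [h3]
          rw [e1, e2, e3]
          simp

-- ===== VERDICT =====
theorem build_diversity_hint_py_spec : Claim_equal_build_diversity_hint_py := by
  intro used max_per_type _
  unfold Spec_build_diversity_hint_py build_diversity_hint_py build_diversity_hint_py_alt
  simp only [pvTier_spec]
  rw [show (fun s t => if PySem.Set.contains (PySem.Set.ofList (used.map Prod.fst)) t
        then s else pvOptAdd s t)
      = (fun s t => if (used.any (fun p => p.1 == t)) then s else pvOptAdd s t) from by
    funext s t; rw [pvContains_ofList_map]]
  rw [pvFoldl_skip_filter]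
  simp only [pvFoldl_optAdd_none]
  by_cases hu : (pvAllTypes.filter (fun t => !(used.any (fun p => p.1 == t)))).isEmpty <;>
    by_cases h1 : ((used.filter (fun p => p.2 == 1)).map (fun p => p.1)).isEmpty <;>
      by_cases h2 : ((used.filter (fun p => p.2 == 2)).map (fun p => p.1)).isEmpty <;>
        by_cases h3 : ((used.filter (fun p => 3 ≤ p.2)).map (fun p => p.1)).isEmpty <;>
          simp [hu, h1, h2, h3, pvLabels, List.zip, List.zipWith, pvEmit, pvJoin_foldl,
            String.append_assoc]
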